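-- pv_equiv track=rewrite | github.com/GODston/UANL_Said_PIA_KmeansModif | Kmeans_CentrosMov_NoSup_Modif.py | fnGetfSLCent
-- ===== SOURCE A (Python) =====
-- def fnGetfSLCent(_fC):
--     fCs = dict()
--     fCl = dict()
--     for i in _fC.keys():
--         fCs[i] = (-1, -1) # (idCentro, fitness)
--         fCl[i] = (-1, -1)
--         # Por cada centro
--         for c in range(len(_fC[i])):
--             if fCs[i][0] == -1 or fCs[i][1] > _fC[i][c]:
--                 fCs[i] = (c, _fC[i][c])
--             if fCl[i][0] == -1 or fCl[i][1] < _fC[i][c]: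
--                 fCl[i] = (c, _fC[i][c])
--     return fCs, fCl
-- ===== SOURCE B (Python) =====
-- def fnGetfSLCent(_fC):
--     fCs = {}
--     fCl = {}
--     for k, vals in _fC.items():
--         pairs = list(enumerate(vals))
--         if not pairs:
--             fCs[k] = (-1, -1)
--             fCl[k] = (-1, -1)
--         else:
--             asc = sorted(pairs, key=lambda t: t[1])
--             desc = sorted(pairs, key=lambda t: t[1], reverse=True)
--             fCs[k] = asc[0]
--             fCl[k] = desc[0]
--     return fCs, fCl
-- ===== Notes on version B (the rewrite author's own statement) =====
-- stated objective: alternative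
-- what changed: A's single interleaved loop threading sentinel-initialised min and max states per key is replaced by a sort-then-pick strategy: enumerate the values into (index, value) pairs, stable-sort them by value ascending and descending, and take the first pair of each sorted list (stability preserves A's first-occurrence tie-breaking).
import Mathlib
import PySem

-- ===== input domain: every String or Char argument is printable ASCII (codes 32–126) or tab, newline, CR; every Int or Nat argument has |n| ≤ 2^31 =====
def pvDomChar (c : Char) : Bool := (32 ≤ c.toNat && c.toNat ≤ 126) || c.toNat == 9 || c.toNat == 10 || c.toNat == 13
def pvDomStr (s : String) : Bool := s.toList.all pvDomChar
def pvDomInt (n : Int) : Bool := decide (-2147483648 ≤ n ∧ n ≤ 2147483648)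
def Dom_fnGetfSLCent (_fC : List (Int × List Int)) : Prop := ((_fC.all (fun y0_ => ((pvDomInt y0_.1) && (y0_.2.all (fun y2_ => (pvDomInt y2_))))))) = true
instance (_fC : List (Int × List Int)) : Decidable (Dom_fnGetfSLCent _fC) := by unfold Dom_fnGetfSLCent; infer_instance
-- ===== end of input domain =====

-- B replaces A's interleaved sentinel-state min/max loop by a sort-then-pick strategy:
-- stable-sort the enumerated (index, value) pairs by value (ascending and descending)
-- and take the first pair of each (alternative decomposition; same return value).

-- ===== PORT A =====
-- literal port of A: one loop over the dict's keys, inner loop over range(len(vals))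
-- threading the pair (fCs[i], fCl[i]) of (idCentro, fitness) states initialised to (-1,-1)
def fnGetfSLCent (_fC : List (Int × List Int)) : (List (Int × Int × Int)) × (List (Int × Int × Int)) :=
  _fC.foldl
    (fun acc kv =>
      let i := kv.1
      let vs := kv.2
      let st :=
        (PySem.List.pyRange 0 (vs.length : Int) 1).foldl
          (fun (p : (Int × Int) × (Int × Int)) c =>
            let v := PySem.List.pyGetD vs c 0
            (if p.1.1 == -1 || p.1.2 > v then (c, v) else p.1,
             if p.2.1 == -1 || p.2.2 < v then (c, v) else p.2))
          ((-1, -1), (-1, -1))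
      (acc.1 ++ [(i, st.1)], acc.2 ++ [(i, st.2)]))
    ([], [])

-- ===== PORT B =====
-- literal port of Source B: pairs = list(enumerate(vals)); if empty, sentinels; else
-- asc = sorted(pairs, key=value), desc = sorted(pairs, key=value, reverse=True); take pairs[0]
def fnGetfSLCent_alt (_fC : List (Int × List Int)) : (List (Int × Int × Int)) × (List (Int × Int × Int)) :=
  _fC.foldl
    (fun acc kv =>
      let pairs := PySem.List.enumerate kv.2
      if pairs.isEmpty then
        (acc.1 ++ [(kv.1, ((-1 : Int), (-1 : Int)))], acc.2 ++ [(kv.1, ((-1 : Int), (-1 : Int)))])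
      else
        let asc := PySem.List.sorted pairs (·.2)
        let desc := PySem.List.sorted pairs (·.2) true
        (acc.1 ++ [(kv.1, PySem.List.pyGetD asc 0 (-1, -1))],
         acc.2 ++ [(kv.1, PySem.List.pyGetD desc 0 (-1, -1))]))
    ([], [])

-- ===== PRECONDITION & SPEC =====
def Spec_fnGetfSLCent (_fC : List (Int × List Int)) (out : (List (Int × Int × Int)) × (List (Int × Int × Int))) : Prop := out = fnGetfSLCent_alt _fC
instance (_fC : List (Int × List Int)) (out : (List (Int × Int × Int)) × (List (Int × Int × Int))) : Decidable (Spec_fnGetfSLCent _fC out) := by unfold Spec_fnGetfSLCent; infer_instance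

-- ===== CLAIM (what is proved, stated in full; the proofs are below) =====
def Claim_equal_fnGetfSLCent : Prop := ∀ (_fC : List (Int × List Int)), Dom_fnGetfSLCent _fC → Spec_fnGetfSLCent _fC (fnGetfSLCent _fC)

-- ===== LEMMAS AND PROOFS =====

-- one right-extension step of the stable sorts (both are left folds of insertBy)
theorem pv_sorted_append_singleton (qs : List (Int × Int)) (z : Int × Int) :
    PySem.List.sorted (qs ++ [z]) (·.2) =
      PySem.List.insertBy (fun a b => decide (a.2 < b.2)) z (PySem.List.sorted qs (·.2)) := by
  rw [PySem.List.sorted_eq_foldl_insertBy, PySem.List.sorted_eq_foldl_insertBy, List.foldl_append,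
    List.foldl_cons, List.foldl_nil]

theorem pv_sorted_rev_append_singleton (qs : List (Int × Int)) (z : Int × Int) :
    PySem.List.sorted (qs ++ [z]) (·.2) true =
      PySem.List.insertBy (fun a b => decide (b.2 < a.2)) z (PySem.List.sorted qs (·.2) true) := by
  rw [PySem.List.sorted_rev_eq_foldl_insertBy, PySem.List.sorted_rev_eq_foldl_insertBy,
    List.foldl_append, List.foldl_cons, List.foldl_nil]

-- A's interleaved fold over any list of (index, value) pairs with no -1 index computes
-- exactly (head of the ascending stable sort, head of the descending stable sort)
theorem pv_core (ps : List (Int × Int)) (h : ∀ p ∈ ps, p.1 ≠ -1) :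
    ps.foldl
        (fun (p : (Int × Int) × (Int × Int)) z =>
          (if p.1.1 == -1 || p.1.2 > z.2 then z else p.1,
           if p.2.1 == -1 || p.2.2 < z.2 then z else p.2))
        ((-1, -1), (-1, -1))
      = ((PySem.List.sorted ps (·.2)).headD (-1, -1),
         (PySem.List.sorted ps (·.2) true).headD (-1, -1)) := by
  induction ps using List.reverseRecOn with
  | nil => simp [PySem.List.sorted_eq_foldl_insertBy, PySem.List.sorted_rev_eq_foldl_insertBy]
  | append_singleton qs z ih =>
    have hq : ∀ p ∈ qs, p.1 ≠ -1 := fun p hp => h p (List.mem_append_left _ hp)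
    rw [List.foldl_append, List.foldl_cons, List.foldl_nil, ih hq,
      pv_sorted_append_singleton, pv_sorted_rev_append_singleton]
    rcases hasc : PySem.List.sorted qs (·.2) with _ | ⟨y, t⟩
    · have hqnil : qs = [] := (PySem.List.sorted_eq_nil_iff _ _ _).mp hasc
      subst hqnil
      simp [PySem.List.insertBy, PySem.List.sorted_rev_eq_foldl_insertBy]
    · rcases hdesc : PySem.List.sorted qs (·.2) true with _ | ⟨w, u⟩
      · exact absurd ((PySem.List.sorted_eq_nil_iff _ _ _).mp hdesc)
          (by rintro rfl; simp [PySem.List.sorted_eq_foldl_insertBy] at hasc)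
      · have hy : y.1 ≠ -1 := hq y ((PySem.List.sorted_perm qs (·.2) false).mem_iff.mp
          (by rw [hasc]; exact List.mem_cons_self))
        have hw : w.1 ≠ -1 := hq w ((PySem.List.sorted_perm qs (·.2) true).mem_iff.mp
          (by rw [hdesc]; exact List.mem_cons_self))
        have hy' : (y.1 == (-1 : Int)) = false := by simpa using hy
        have hw' : (w.1 == (-1 : Int)) = false := by simpa using hw
        simp only [List.headD_cons, hy', hw', Bool.false_or, PySem.List.insertBy]
        by_cases h1 : y.2 > z.2 <;> by_cases h2 : w.2 < z.2 <;> simp [h1, h2]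

-- ===== VERDICT (by name: the statement is the Claim_ definition above) =====
theorem fnGetfSLCent_spec : Claim_equal_fnGetfSLCent := by
  intro _fC _
  show fnGetfSLCent _fC = fnGetfSLCent_alt _fC
  unfold fnGetfSLCent fnGetfSLCent_alt
  congr 1
  funext acc kv
  dsimp only
  have hmap := PySem.List.enumerate_eq_map_pyRange kv.2 0
  rw [PySem.List.len_eq] at hmap
  have hfold :
      (PySem.List.pyRange 0 (kv.2.length : Int) 1).foldl
          (fun (p : (Int × Int) × (Int × Int)) c =>
            let v := PySem.List.pyGetD kv.2 c 0
            (if p.1.1 == -1 || p.1.2 > v then (c, v) else p.1,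
             if p.2.1 == -1 || p.2.2 < v then (c, v) else p.2))
          ((-1, -1), (-1, -1))
        = (PySem.List.enumerate kv.2).foldl
            (fun (p : (Int × Int) × (Int × Int)) z =>
              (if p.1.1 == -1 || p.1.2 > z.2 then z else p.1,
               if p.2.1 == -1 || p.2.2 < z.2 then z else p.2))
            ((-1, -1), (-1, -1)) := by
    rw [hmap, List.foldl_map]
  rw [hfold, pv_core _ (fun p hp => by
    rcases (PySem.List.mem_enumerate_iff kv.2 0 p).mp hp with ⟨k, hk, rfl⟩
    simp)]
  rcases he : PySem.List.enumerate kv.2 with _ | ⟨y, t⟩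
  · simp [PySem.List.sorted_eq_foldl_insertBy, PySem.List.sorted_rev_eq_foldl_insertBy]
  · simp only [List.isEmpty_cons, Bool.false_eq_true, if_false]
    rcases hasc : PySem.List.sorted (y :: t) (·.2) with _ | ⟨a, s⟩
    · exact absurd ((PySem.List.sorted_eq_nil_iff _ _ _).mp hasc) (by simp)
    · rcases hdesc : PySem.List.sorted (y :: t) (·.2) true with _ | ⟨b, u⟩
      · exact absurd ((PySem.List.sorted_eq_nil_iff _ _ _).mp hdesc) (by simp)
      · simp [PySem.List.pyGetD_zero_cons]
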